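-- pv_equiv track=rewrite | github.com/budgierless/vibeship-spark-intelligence | lib/validation_loop.py | _prompt_polarity
-- ===== SOURCE A (Python) =====
-- from typing import Dict, List, Optional, Tuple
--
-- POS_TRIGGERS = {
--     "prefer", "like", "love", "want", "need", "please", "use", "using", "require",
--     "should", "must", "explain", "examples", "example", "brief", "short", "detailed",
--     "step", "steps", "walk", "show",
-- }
--
-- NEG_TRIGGERS = {
--     "no", "not", "never", "avoid", "dont", "stop", "without", "hate", "dislike",
-- }
--
-- def _prompt_polarity(tokens: List[str], keyword_positions: List[int]) -> Optional[str]: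
--     if not keyword_positions:
--         return None
--     has_pos = False
--     has_neg = False
--     for idx in keyword_positions:
--         start = max(0, idx - 3)
--         end = min(len(tokens), idx + 4)
--         window = tokens[start:end]
--         if any(w in NEG_TRIGGERS for w in window):
--             has_neg = True
--         if any(w in POS_TRIGGERS for w in window):
--             has_pos = True
--
--     if has_neg and not has_pos:
--         return "neg"
--     if has_pos and not has_neg:
--         return "pos"
--     if has_neg and has_pos:
--         return "neg"
--     return None
-- ===== SOURCE B (Python) =====
-- from typing import Dict, List, Optional, Tuple
--
-- POS_TRIGGERS = {
--     "prefer", "like", "love", "want", "need", "please", "use", "using", "require",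
--     "should", "must", "explain", "examples", "example", "brief", "short", "detailed",
--     "step", "steps", "walk", "show",
-- }
--
-- NEG_TRIGGERS = {
--     "no", "not", "never", "avoid", "dont", "stop", "without", "hate", "dislike",
-- }
--
-- def _prompt_polarity(tokens, keyword_positions):
--     def near_keyword(i):
--         return any(idx - 3 <= i <= idx + 3 for idx in keyword_positions)
--     if any(tok in NEG_TRIGGERS and near_keyword(i) for i, tok in enumerate(tokens)):
--         return "neg"
--     if any(tok in POS_TRIGGERS and near_keyword(i) for i, tok in enumerate(tokens)):
--         return "pos"
--     return None
-- ===== Notes on version B (the rewrite author's own statement) =====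
-- stated objective: simpler
-- what changed: B inverts the traversal: instead of building a clipped slice around each keyword position and scanning each slice twice into two sticky flags resolved by a four-branch ladder, B makes one short-circuited pass over the tokens per polarity, reporting 'neg' if some negative trigger token lies within 3 positions of a keyword, else 'pos' on the same test for positive triggers, else None.
-- intended difference: On inputs where some keyword position is below -4, A's slice stop min(len,idx+4) is negative, so the Python slice wraps and A scans an unintended prefix of the tokens; when that prefix supplies a polarity ('neg' or 'pos') that no genuine +-3 window supports, A returns the accidental polarity while B returns the verdict of the genuine windows only, which is the intended reading of 'polarity of tokens near keywords'. — e.g. on _prompt_polarity(["no", "a", "b"], [-6]): A returns some "neg", B returns none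
import Mathlib
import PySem

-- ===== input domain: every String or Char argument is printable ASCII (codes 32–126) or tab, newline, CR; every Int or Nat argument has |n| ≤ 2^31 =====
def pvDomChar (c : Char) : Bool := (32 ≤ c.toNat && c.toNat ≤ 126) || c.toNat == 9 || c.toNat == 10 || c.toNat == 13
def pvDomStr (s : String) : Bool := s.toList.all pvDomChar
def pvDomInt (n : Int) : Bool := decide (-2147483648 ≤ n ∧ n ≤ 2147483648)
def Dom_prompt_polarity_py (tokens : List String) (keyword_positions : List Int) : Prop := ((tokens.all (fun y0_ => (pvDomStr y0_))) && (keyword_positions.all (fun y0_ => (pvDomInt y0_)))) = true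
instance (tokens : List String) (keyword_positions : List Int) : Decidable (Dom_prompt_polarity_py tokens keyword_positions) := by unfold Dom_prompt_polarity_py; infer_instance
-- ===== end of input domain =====

-- B inverts the traversal: instead of slicing a ±3 window around each keyword position and
-- scanning it twice into two flags, B scans the tokens once per polarity and asks whether a
-- trigger token lies near some keyword position (objective: simpler); proved equal outside D_.


-- shared module-level constants (POS_TRIGGERS / NEG_TRIGGERS, used only via membership)
def posTriggers : List String :=
  ["prefer", "like", "love", "want", "need", "please", "use", "using", "require",
   "should", "must", "explain", "examples", "example", "brief", "short", "detailed",
   "step", "steps", "walk", "show"]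
def negTriggers : List String :=
  ["no", "not", "never", "avoid", "dont", "stop", "without", "hate", "dislike"]

-- ===== PORT A =====
def prompt_polarity_py (tokens : List String) (keyword_positions : List Int) : Option String :=
  if keyword_positions = [] then none
  else
    let st : Bool × Bool := keyword_positions.foldl (fun (s : Bool × Bool) idx =>
      let start := max 0 (idx - 3)
      let stop := min (tokens.length : Int) (idx + 4)
      let window := PySem.List.slice tokens (some start) (some stop)
      let hasNeg := if window.any (fun w => negTriggers.contains w) then true else s.2
      let hasPos := if window.any (fun w => posTriggers.contains w) then true else s.1
      (hasPos, hasNeg)) (false, false)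
    if st.2 && !st.1 then some "neg"
    else if st.1 && !st.2 then some "pos"
    else if st.2 && st.1 then some "neg"
    else none

-- ===== PORT B =====
def prompt_polarity_py_alt (tokens : List String) (keyword_positions : List Int) : Option String :=
  let near_keyword : Int → Bool := fun i =>
    keyword_positions.any (fun idx => decide (idx - 3 ≤ i) && decide (i ≤ idx + 3))
  if (PySem.List.enumerate tokens 0).any (fun p => negTriggers.contains p.2 && near_keyword p.1)
    then some "neg"
  else if (PySem.List.enumerate tokens 0).any (fun p => posTriggers.contains p.2 && near_keyword p.1)
    then some "pos"
  else none

-- ===== PRECONDITION & SPEC =====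
-- boolean predicates used only to state D_ (not used by either port):
-- some token of trig sits within ±3 of some keyword position
def legitTrig (tokens : List String) (kps : List Int) (trig : List String) : Bool :=
  tokens.zipIdx.any fun p => trig.contains p.1 &&
    kps.any fun idx => decide (((p.2 : Int) - idx).natAbs ≤ 3)
-- some keyword position below -4 makes the Python slice stop wrap, and the dragged-in
-- token prefix contains a token of trig
def accTrig (tokens : List String) (kps : List Int) (trig : List String) : Bool :=
  kps.any fun idx => decide (idx + 4 < 0) &&
    (tokens.take (((tokens.length : Int) + idx + 4).toNat)).any trig.contains

-- A keyword position below -4 makes A's slice stop negative, so the Python slice wraps and A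
-- accidentally scans a prefix of the tokens; when that prefix supplies a polarity the genuine ±3
-- windows do not, A returns that accidental polarity while B returns only what the genuine windows
-- near the keywords support, which is the intended reading of 'polarity of tokens near keywords'.
def D_prompt_polarity_py (tokens : List String) (keyword_positions : List Int) : Prop :=
  (!legitTrig tokens keyword_positions negTriggers &&
    (accTrig tokens keyword_positions negTriggers ||
      (accTrig tokens keyword_positions posTriggers &&
        !legitTrig tokens keyword_positions posTriggers))) = true
instance (tokens : List String) (keyword_positions : List Int) : Decidable (D_prompt_polarity_py tokens keyword_positions) := by unfold D_prompt_polarity_py; infer_instance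

def Spec_prompt_polarity_py (tokens : List String) (keyword_positions : List Int) (out : Option String) : Prop := ¬ D_prompt_polarity_py tokens keyword_positions → out = prompt_polarity_py_alt tokens keyword_positions
instance (tokens : List String) (keyword_positions : List Int) (out : Option String) : Decidable (Spec_prompt_polarity_py tokens keyword_positions out) := by unfold Spec_prompt_polarity_py; infer_instance

def pvDiffWitness_prompt_polarity_py : List String × List Int := (["no", "a", "b"], [-6])
def pvDiffWitnessOut_prompt_polarity_py : (Option String) × (Option String) := (some "neg", none)

-- ===== CLAIM (what is proved, stated in full; the proofs are below) =====
def Claim_unchanged_prompt_polarity_py : Prop := ∀ (tokens : List String) (keyword_positions : List Int), Dom_prompt_polarity_py tokens keyword_positions → Spec_prompt_polarity_py tokens keyword_positions (prompt_polarity_py tokens keyword_positions)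
def Claim_changed_prompt_polarity_py : Prop := Dom_prompt_polarity_py (pvDiffWitness_prompt_polarity_py.1) (pvDiffWitness_prompt_polarity_py.2) ∧ D_prompt_polarity_py (pvDiffWitness_prompt_polarity_py.1) (pvDiffWitness_prompt_polarity_py.2) ∧ prompt_polarity_py (pvDiffWitness_prompt_polarity_py.1) (pvDiffWitness_prompt_polarity_py.2) = pvDiffWitnessOut_prompt_polarity_py.1 ∧ prompt_polarity_py_alt (pvDiffWitness_prompt_polarity_py.1) (pvDiffWitness_prompt_polarity_py.2) = pvDiffWitnessOut_prompt_polarity_py.2 ∧ pvDiffWitnessOut_prompt_polarity_py.1 ≠ pvDiffWitnessOut_prompt_polarity_py.2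
def Claim_exact_prompt_polarity_py : Prop := ∀ (tokens : List String) (keyword_positions : List Int), Dom_prompt_polarity_py tokens keyword_positions → D_prompt_polarity_py tokens keyword_positions → prompt_polarity_py tokens keyword_positions ≠ prompt_polarity_py_alt tokens keyword_positions

-- ===== LEMMAS AND PROOFS =====

theorem bool_eq_of_iff (a b : Bool) (h : a = true ↔ b = true) : a = b := by
  cases a <;> cases b <;> simp_all

theorem clampIdx_cast (n : Nat) (b : Int) :
    ((PySem.List.clampIdx n b : Nat) : Int) = max 0 (min (if b < 0 then b + n else b) n) := by
  simp only [PySem.List.clampIdx]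
  split_ifs <;> omega

-- elements of a python slice, by index
theorem slice_any_iff (xs : List String) (a b : Int) (p : String → Bool) :
    ((PySem.List.slice xs (some a) (some b)).any p = true) ↔
      ∃ i ∈ List.range xs.length,
        (PySem.List.clampIdx xs.length a ≤ i ∧ i < PySem.List.clampIdx xs.length b) ∧
        p (xs.getD i "") = true := by
  have hs : PySem.List.slice xs (some a) (some b) =
      ((xs.drop (PySem.List.clampIdx xs.length a)).take
        (PySem.List.clampIdx xs.length b - PySem.List.clampIdx xs.length a)) := by
    simp [PySem.List.slice]
  set s := PySem.List.clampIdx xs.length a with hsdef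
  set e := PySem.List.clampIdx xs.length b with hedef
  have hsn : s ≤ xs.length := by have := clampIdx_cast xs.length a; omega
  have hen : e ≤ xs.length := by have := clampIdx_cast xs.length b; omega
  rw [hs, List.any_eq_true]
  constructor
  · rintro ⟨x, hx, hpx⟩
    rw [List.mem_iff_getElem] at hx
    obtain ⟨j, hj, hxj⟩ := hx
    simp only [List.length_take, List.length_drop] at hj
    refine ⟨s + j, ?_, ⟨by omega, by omega⟩, ?_⟩
    · simp only [List.mem_range]; omega
    · rw [List.getElem_take, List.getElem_drop] at hxj
      rw [List.getD_eq_getElem _ _ (by omega)]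
      rw [← hxj] at hpx; exact hpx
  · rintro ⟨i, hi, ⟨h1, h2⟩, hp⟩
    simp only [List.mem_range] at hi
    refine ⟨xs.getD i "", ?_, hp⟩
    rw [List.mem_iff_getElem]
    refine ⟨i - s, by simp [List.length_take, List.length_drop]; omega, ?_⟩
    rw [List.getElem_take, List.getElem_drop, List.getD_eq_getElem _ _ (by omega)]
    congr 1; omega

-- the prefix-any condition of accTrig, by index
theorem take_exists_iff (xs : List String) (m : Nat) (p : String → Bool) :
    (∃ x ∈ xs.take m, p x = true) ↔ ∃ i, i < xs.length ∧ i < m ∧ p (xs.getD i "") = true := by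
  constructor
  · rintro ⟨x, hx, hpx⟩
    rw [List.mem_iff_getElem] at hx
    obtain ⟨j, hj, hxj⟩ := hx
    simp only [List.length_take] at hj
    rw [List.getElem_take] at hxj
    refine ⟨j, by omega, by omega, ?_⟩
    rw [List.getD_eq_getElem _ _ (by omega), hxj]; exact hpx
  · rintro ⟨i, hi, him, hp⟩
    refine ⟨xs.getD i "", ?_, hp⟩
    rw [List.mem_iff_getElem]
    refine ⟨i, by simp only [List.length_take]; omega, ?_⟩
    rw [List.getElem_take, List.getD_eq_getElem _ _ (by omega)]

-- A's per-position window test, split into genuine-window and wraparound evidence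
theorem windowAny_eq (tokens : List String) (idx : Int) (trig : List String) :
    ((PySem.List.slice tokens (some (max 0 (idx - 3)))
        (some (min (tokens.length : Int) (idx + 4)))).any (fun w => trig.contains w))
    = (((List.range tokens.length).any (fun i =>
          trig.contains (tokens.getD i "") && decide (((i : Int) - idx).natAbs ≤ 3)))
       || (decide (idx + 4 < 0) &&
            (tokens.take (((tokens.length : Int) + idx + 4).toNat)).any trig.contains)) := by
  apply bool_eq_of_iff
  rw [slice_any_iff]
  have hca := clampIdx_cast tokens.length (max 0 (idx - 3))
  have hcb := clampIdx_cast tokens.length (min (tokens.length : Int) (idx + 4))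
  rw [if_neg (by omega : ¬ max 0 (idx - 3) < 0)] at hca
  simp only [Bool.or_eq_true, Bool.and_eq_true, decide_eq_true_eq, List.any_eq_true,
    List.mem_range]
  rw [take_exists_iff]
  by_cases h : idx + 4 < 0
  · rw [if_pos (by omega : min (tokens.length : Int) (idx + 4) < 0)] at hcb
    constructor
    · rintro ⟨i, hi, ⟨h1, h2⟩, hp⟩
      exact Or.inr ⟨h, i, hi, by omega, hp⟩
    · rintro (⟨i, hi, _, hle⟩ | ⟨_, i, hi, him, hp⟩)
      · omega
      · exact ⟨i, hi, ⟨by omega, by omega⟩, hp⟩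
  · rw [if_neg (by omega : ¬ min (tokens.length : Int) (idx + 4) < 0)] at hcb
    constructor
    · rintro ⟨i, hi, ⟨h1, h2⟩, hp⟩
      exact Or.inl ⟨i, hi, hp, by omega⟩
    · rintro (⟨i, hi, hp, hle⟩ | ⟨hlt, _⟩)
      · exact ⟨i, hi, ⟨by omega, by omega⟩, hp⟩
      · omega

-- any over a pointwise disjunction splits
theorem any_or_split (l : List Int) (f g : Int → Bool) :
    l.any (fun x => f x || g x) = (l.any f || l.any g) := by
  apply bool_eq_of_iff
  simp only [List.any_eq_true, Bool.or_eq_true]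
  constructor
  · rintro ⟨x, hx, (h | h)⟩
    · exact Or.inl ⟨x, hx, h⟩
    · exact Or.inr ⟨x, hx, h⟩
  · rintro (⟨x, hx, h⟩ | ⟨x, hx, h⟩)
    · exact ⟨x, hx, Or.inl h⟩
    · exact ⟨x, hx, Or.inr h⟩

-- any over zipIdx, by index
theorem zipAny_iff (xs : List String) (f : String × Nat → Bool) :
    (xs.zipIdx.any f = true) ↔ ∃ i, i < xs.length ∧ f (xs.getD i "", i) = true := by
  rw [List.any_eq_true]
  constructor
  · rintro ⟨p, hp, hfp⟩
    rw [List.mem_iff_getElem] at hp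
    obtain ⟨j, hj, hpj⟩ := hp
    rw [List.length_zipIdx] at hj
    refine ⟨j, hj, ?_⟩
    rw [List.getD_eq_getElem _ _ hj]
    rw [List.getElem_zipIdx] at hpj
    rw [← hpj] at hfp
    simpa using hfp
  · rintro ⟨i, hi, hf⟩
    refine ⟨(xs[i], i), ?_, ?_⟩
    · rw [List.mem_iff_getElem]
      exact ⟨i, by simpa [List.length_zipIdx], by simp [List.getElem_zipIdx]⟩
    · rw [List.getD_eq_getElem _ _ hi] at hf
      exact hf

-- A's 'any window of any keyword position has a trigger' = legitimate or wraparound evidence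
theorem anyWindow_eq (tokens : List String) (kps : List Int) (trig : List String) :
    (kps.any (fun idx =>
        (PySem.List.slice tokens (some (max 0 (idx - 3)))
          (some (min (tokens.length : Int) (idx + 4)))).any (fun w => trig.contains w)))
      = (legitTrig tokens kps trig || accTrig tokens kps trig) := by
  simp only [windowAny_eq]
  rw [any_or_split]
  congr 1
  -- swap the two quantifier layers of the legitimate part
  apply bool_eq_of_iff
  unfold legitTrig
  rw [zipAny_iff]
  simp only [List.any_eq_true, Bool.and_eq_true, List.mem_range]
  constructor
  · rintro ⟨idx, hidx, i, hi, hp, hd⟩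
    exact ⟨i, hi, hp, idx, hidx, by simpa using hd⟩
  · rintro ⟨i, hi, hp, idx, hidx, hd⟩
    exact ⟨idx, hidx, i, hi, hp, by simpa using hd⟩

-- A's flag-accumulating fold is a pair of disjunctions
theorem foldA_gen (f g : Int → Bool) (l : List Int) (p q : Bool) :
    l.foldl (fun (s : Bool × Bool) idx =>
        ((if f idx = true then true else s.1), (if g idx = true then true else s.2))) (p, q)
      = (p || l.any f, q || l.any g) := by
  induction l generalizing p q with
  | nil => simp
  | cons x xs ih =>
    simp only [List.foldl_cons, List.any_cons, ih]
    cases hf : f x <;> cases hg : g x <;> cases p <;> cases q <;> simp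

-- A as a ladder over the two evidence sources
theorem A_eq_ladder (tokens : List String) (kps : List Int) :
    prompt_polarity_py tokens kps =
      (if legitTrig tokens kps negTriggers || accTrig tokens kps negTriggers then some "neg"
       else if legitTrig tokens kps posTriggers || accTrig tokens kps posTriggers then some "pos"
       else none) := by
  by_cases h : kps = []
  · subst h
    simp [prompt_polarity_py, legitTrig, accTrig]
  · simp only [prompt_polarity_py, if_neg h]
    rw [foldA_gen]
    simp only [Bool.false_or, anyWindow_eq]
    cases hn : (legitTrig tokens kps negTriggers || accTrig tokens kps negTriggers) <;>
      cases hp : (legitTrig tokens kps posTriggers || accTrig tokens kps posTriggers) <;>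
      simp_all

-- B as a ladder over the genuine evidence only
theorem B_eq_ladder (tokens : List String) (kps : List Int) :
    prompt_polarity_py_alt tokens kps =
      (if legitTrig tokens kps negTriggers then some "neg"
       else if legitTrig tokens kps posTriggers then some "pos"
       else none) := by
  have key : ∀ trig : List String,
      ((PySem.List.enumerate tokens 0).any (fun p => trig.contains p.2 &&
        kps.any (fun idx => decide (idx - 3 ≤ p.1) && decide (p.1 ≤ idx + 3))))
      = legitTrig tokens kps trig := by
    intro trig
    apply bool_eq_of_iff
    unfold legitTrig
    rw [zipAny_iff]
    simp only [List.any_eq_true, Bool.and_eq_true, decide_eq_true_eq]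
    constructor
    · rintro ⟨p, hp, hc, idx, hidx, hd1, hd2⟩
      rw [PySem.List.mem_enumerate_iff] at hp
      obtain ⟨k, hk, rfl⟩ := hp
      refine ⟨k, hk, ?_, idx, hidx, ?_⟩
      · rw [List.getD_eq_getElem _ _ hk]; simpa using hc
      · simp only at hd1 hd2; omega
    · rintro ⟨i, hi, hc, idx, hidx, hd⟩
      refine ⟨((i : Int), tokens[i]), ?_, ?_, idx, hidx, ?_, ?_⟩
      · rw [PySem.List.mem_enumerate_iff]
        exact ⟨i, hi, by simp⟩
      · rw [List.getD_eq_getElem _ _ hi] at hc; simpa using hc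
      · omega
      · omega
  simp only [prompt_polarity_py_alt, key]

-- ===== VERDICT (by name: the statements are the Claim_ definitions above) =====
theorem prompt_polarity_py_spec : Claim_unchanged_prompt_polarity_py := by
  intro tokens kps _ hD
  rw [A_eq_ladder, B_eq_ladder]
  revert hD
  unfold D_prompt_polarity_py
  cases hln : legitTrig tokens kps negTriggers <;>
    cases hlp : legitTrig tokens kps posTriggers <;>
    cases han : accTrig tokens kps negTriggers <;>
    cases hap : accTrig tokens kps posTriggers <;>
    simp_all

theorem prompt_polarity_py_changed : Claim_changed_prompt_polarity_py := by
  unfold Claim_changed_prompt_polarity_py; decide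

theorem prompt_polarity_py_tight : Claim_exact_prompt_polarity_py := by
  intro tokens kps _ hD
  rw [A_eq_ladder, B_eq_ladder]
  revert hD
  unfold D_prompt_polarity_py
  cases hln : legitTrig tokens kps negTriggers <;>
    cases hlp : legitTrig tokens kps posTriggers <;>
    cases han : accTrig tokens kps negTriggers <;>
    cases hap : accTrig tokens kps posTriggers <;>
    simp_all
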